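-- pv_equiv track=rewrite | github.com/Hendrik240298/reserving-studio | source/services/diagnostics_service.py | _max_consecutive_ages
-- ===== SOURCE A (Python) =====
-- def _max_consecutive_ages(ages: list[int]) -> int:
--     if not ages:
--         return 0
--     ordered = sorted(set(ages))
--     best = 1
--     run = 1
--     for prev, current in zip(ordered[:-1], ordered[1:]):
--         if current - prev <= 12:
--             run += 1
--             if run > best:
--                 best = run
--         else:
--             run = 1
--     return best
-- ===== SOURCE B (Python) =====
-- def _max_consecutive_ages(ages: list[int]) -> int:
--     if not ages:
--         return 0
--     ordered = sorted(set(ages))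
--     n = len(ordered)
--     breaks = [-1]
--     for i in range(n - 1):
--         if ordered[i + 1] - ordered[i] > 12:
--             breaks.append(i)
--     breaks.append(n - 1)
--     return max(breaks[j + 1] - breaks[j] for j in range(len(breaks) - 1))
-- ===== Notes on version B (the rewrite author's own statement) =====
-- stated objective: alternative
-- what changed: A's inline best/run accumulator loop is replaced by building a breakpoint-index table (sentinel -1, every index whose gap exceeds 12, and the last index) and then taking the maximum of adjacent breakpoint differences in a separate pass.
import Mathlib
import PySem

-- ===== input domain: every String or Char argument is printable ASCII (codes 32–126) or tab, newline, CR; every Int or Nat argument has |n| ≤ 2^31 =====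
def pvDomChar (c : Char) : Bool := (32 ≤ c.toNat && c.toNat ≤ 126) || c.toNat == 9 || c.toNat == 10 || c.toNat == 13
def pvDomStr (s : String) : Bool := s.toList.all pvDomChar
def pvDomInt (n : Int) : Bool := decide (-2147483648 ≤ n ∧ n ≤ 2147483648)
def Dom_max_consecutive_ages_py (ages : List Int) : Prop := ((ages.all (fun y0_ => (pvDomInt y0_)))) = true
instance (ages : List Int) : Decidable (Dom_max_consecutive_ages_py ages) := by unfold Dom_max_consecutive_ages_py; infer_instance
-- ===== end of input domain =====

-- B replaces A's inline best/run accumulator by a breakpoint-index table followed by a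
-- separate max-over-adjacent-differences pass (objective: alternative decomposition, same cost).

-- ===== PORT A =====
-- loop body of A: st = (best, run), pc = (prev, current)
def pvStepA (st : Int × Int) (pc : Int × Int) : Int × Int :=
  if pc.2 - pc.1 ≤ 12 then
    (if st.2 + 1 > st.1 then st.2 + 1 else st.1, st.2 + 1)
  else (st.1, 1)

def max_consecutive_ages_py (ages : List Int) : Int :=
  if ages = [] then 0
  else
    let ordered := PySem.List.sorted (PySem.Set.ofList ages) (fun x => x) false
    ((List.zip (PySem.List.slice ordered none (some (-1))) (PySem.List.slice ordered (some 1) none)).foldl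
      pvStepA (1, 1)).1

-- ===== PORT B =====
-- the adjacent differences breaks[j+1]-breaks[j], j = 0 .. len(breaks)-2, in order (Source B's genexpr)
def pvAdjDiffs (l : List Int) : List Int := (List.zip l l.tail).map (fun p => p.2 - p.1)

-- loop body of Source B: append index i when the gap at i exceeds 12
-- (ordered[i] / ordered[i+1] read with List.getD: both indices are always in range here, so this is exact)
def pvCollect (ordered : List Int) (acc : List Int) (i : Nat) : List Int :=
  if ordered.getD (i+1) 0 - ordered.getD i 0 > 12 then acc ++ [(i : Int)] else acc

def max_consecutive_ages_py_alt (ages : List Int) : Int :=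
  if ages = [] then 0
  else
    let ordered := PySem.List.sorted (PySem.Set.ofList ages) (fun x => x) false
    let n := ordered.length
    -- breaks = [-1]; for i in range(n-1): …append…; breaks.append(n-1)
    -- (range(n-1) is ported as List.range (n-1) over Nat indices; exact since n ≥ 1 here)
    let breaks := (List.range (n - 1)).foldl (pvCollect ordered) [(-1 : Int)] ++ [(n : Int) - 1]
    match PySem.List.max? (pvAdjDiffs breaks) (fun x => x) with
    | some v => v
    | none => 0  -- unreachable: breaks always has at least two elements

-- ===== PRECONDITION & SPEC =====
def Spec_max_consecutive_ages_py (ages : List Int) (out : Int) : Prop := out = max_consecutive_ages_py_alt ages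
instance (ages : List Int) (out : Int) : Decidable (Spec_max_consecutive_ages_py ages out) := by unfold Spec_max_consecutive_ages_py; infer_instance

-- ===== CLAIM (what is proved, stated in full; the proofs are below) =====
def Claim_equal_max_consecutive_ages_py : Prop := ∀ (ages : List Int), Dom_max_consecutive_ages_py ages → Spec_max_consecutive_ages_py ages (max_consecutive_ages_py ages)

-- ===== LEMMAS AND PROOFS =====

-- proof-side views of the two computations over ordered, parametrised by the number m of gaps processed
def pvBig (o : List Int) (i : Nat) : Bool := decide (o.getD (i+1) 0 - o.getD i 0 > 12)

def pvMids (o : List Int) (m : Nat) : List Int := ((List.range m).filter (pvBig o)).map (fun i => (i : Int))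

def pvBreaks (o : List Int) (m : Nat) : List Int := -1 :: pvMids o m ++ [(m : Int)]

def pvMaxD : List Int → Int
  | [] => 0
  | a :: t => t.foldl max a

def pvAState (o : List Int) (m : Nat) : Int × Int :=
  (List.range m).foldl (fun st i => pvStepA st (o.getD i 0, o.getD (i+1) 0)) (1, 1)

theorem pvAdjDiffs_cons_cons (a b : Int) (t : List Int) :
    pvAdjDiffs (a :: b :: t) = (b - a) :: pvAdjDiffs (b :: t) := rfl

theorem pvAdjDiffs_append (l : List Int) (h : l ≠ []) (x : Int) :
    pvAdjDiffs (l ++ [x]) = pvAdjDiffs l ++ [x - l.getLast h] := by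
  induction l with
  | nil => exact absurd rfl h
  | cons a t ih =>
    cases t with
    | nil => rfl
    | cons b t' =>
      have := ih (by simp)
      simp only [List.cons_append, pvAdjDiffs_cons_cons] at *
      rw [this]
      simp [List.getLast_cons]

theorem pvAdjDiffs_length (l : List Int) : (pvAdjDiffs l).length = l.length - 1 := by
  simp [pvAdjDiffs, List.length_tail]

theorem pvMaxD_append_cons (a : Int) (t : List Int) (x : Int) :
    pvMaxD ((a :: t) ++ [x]) = max (pvMaxD (a :: t)) x := by
  simp [pvMaxD, List.foldl_append]

theorem pvMaxD_append_succ (P : List Int) (y : Int) :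
    pvMaxD (P ++ [y + 1]) = max (pvMaxD (P ++ [y])) (y + 1) := by
  cases P with
  | nil => simp [pvMaxD]
  | cons a t =>
    rw [pvMaxD_append_cons, pvMaxD_append_cons, max_assoc]
    congr 1
    simp

theorem pvInv (o : List Int) (m : Nat) :
    1 ≤ (pvAState o m).1 ∧
    (pvAState o m).2 = (m : Int) - ((-1 : Int) :: pvMids o m).getLast (by simp) ∧
    pvMaxD (pvAdjDiffs (pvBreaks o m)) = (pvAState o m).1 := by
  induction m with
  | zero =>
    refine ⟨by simp [pvAState], by simp [pvAState, pvMids], ?_⟩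
    simp [pvAState, pvMids, pvBreaks]
    rfl
  | succ m ih =>
    obtain ⟨hb1, hr, hmax⟩ := ih
    have hstate : pvAState o (m+1) = pvStepA (pvAState o m) (o.getD m 0, o.getD (m+1) 0) := by
      simp [pvAState, List.range_succ, List.foldl_append]
    have hc : ((m+1 : Nat) : Int) = (m : Int) + 1 := by push_cast; ring
    cases hbig : pvBig o m with
    | false =>
      have hgap : o.getD (m+1) 0 - o.getD m 0 ≤ 12 := by
        have := of_decide_eq_false hbig
        omega
      have hmids : pvMids o (m+1) = pvMids o m := by
        simp [pvMids, List.range_succ, List.filter_append, hbig]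
      have hL : ((-1 : Int) :: pvMids o m) ≠ [] := by simp
      have hbrk : pvBreaks o m = ((-1 : Int) :: pvMids o m) ++ [(m : Int)] := rfl
      have hbrk' : pvBreaks o (m+1) = ((-1 : Int) :: pvMids o m) ++ [(m : Int) + 1] := by
        rw [show pvBreaks o (m+1) = -1 :: (pvMids o (m+1) ++ [((m+1 : Nat) : Int)]) from rfl,
          hmids, hc]
        rfl
      have hstep : pvStepA (pvAState o m) (o.getD m 0, o.getD (m+1) 0)
          = (max (pvAState o m).1 ((pvAState o m).2 + 1), (pvAState o m).2 + 1) := by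
        simp only [pvStepA]
        rw [if_pos hgap, max_def]
        split_ifs with h1 h2 <;> simp only [Prod.mk.injEq, and_true] <;> omega
      rw [hstate, hstep]
      refine ⟨le_trans hb1 (le_max_left _ _), ?_, ?_⟩
      · show (pvAState o m).2 + 1 = ((m+1 : Nat) : Int) - ((-1 : Int) :: pvMids o (m+1)).getLast (by simp)
        rw [hr, hc]
        have : ((-1 : Int) :: pvMids o (m+1)).getLast (by simp)
            = ((-1 : Int) :: pvMids o m).getLast hL := by
          congr 1; rw [hmids]
        rw [this]
        ring
      · show pvMaxD (pvAdjDiffs (pvBreaks o (m+1))) = max (pvAState o m).1 ((pvAState o m).2 + 1)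
        rw [hbrk', pvAdjDiffs_append _ hL]
        have h1 : ((m : Int) + 1) - ((-1 : Int) :: pvMids o m).getLast hL
            = ((m : Int) - ((-1 : Int) :: pvMids o m).getLast hL) + 1 := by ring
        rw [h1, pvMaxD_append_succ]
        have h2 : pvMaxD (pvAdjDiffs ((-1 : Int) :: pvMids o m)
            ++ [(m : Int) - ((-1 : Int) :: pvMids o m).getLast hL]) = (pvAState o m).1 := by
          rw [← pvAdjDiffs_append _ hL, ← hbrk]
          exact hmax
        rw [h2, ← hr]
    | true =>
      have hgap : ¬ (o.getD (m+1) 0 - o.getD m 0 ≤ 12) := by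
        have := of_decide_eq_true hbig
        omega
      have hmids : pvMids o (m+1) = pvMids o m ++ [(m : Int)] := by
        simp [pvMids, List.range_succ, List.filter_append, hbig]
      have hbrk' : pvBreaks o (m+1) = pvBreaks o m ++ [(m : Int) + 1] := by
        rw [show pvBreaks o (m+1) = -1 :: (pvMids o (m+1) ++ [((m+1 : Nat) : Int)]) from rfl,
          hmids, hc]
        rfl
      have hBne : pvBreaks o m ≠ [] := by simp [pvBreaks]
      have hBlast : (pvBreaks o m).getLast hBne = (m : Int) := by
        have h3 : (pvBreaks o m).getLast hBne
            = (((-1 : Int) :: pvMids o m) ++ [(m : Int)]).getLast (by simp) := by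
          congr 1
        rw [h3]
        exact List.getLast_concat
      have hstep : pvStepA (pvAState o m) (o.getD m 0, o.getD (m+1) 0)
          = ((pvAState o m).1, 1) := by
        simp only [pvStepA]
        rw [if_neg hgap]
      rw [hstate, hstep]
      refine ⟨hb1, ?_, ?_⟩
      · show (1 : Int) = ((m+1 : Nat) : Int) - ((-1 : Int) :: pvMids o (m+1)).getLast (by simp)
        have h4 : ((-1 : Int) :: pvMids o (m+1)).getLast (by simp) = (m : Int) := by
          have h5 : ((-1 : Int) :: pvMids o (m+1)).getLast (by simp)
              = (((-1 : Int) :: pvMids o m) ++ [(m : Int)]).getLast (by simp) := by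
            congr 1
            rw [hmids]
            rfl
          rw [h5]
          exact List.getLast_concat
        rw [h4, hc]
        ring
      · show pvMaxD (pvAdjDiffs (pvBreaks o (m+1))) = (pvAState o m).1
        rw [hbrk', pvAdjDiffs_append _ hBne, hBlast]
        have hd : pvAdjDiffs (pvBreaks o m) ≠ [] := by
          have hlen : (pvAdjDiffs (pvBreaks o m)).length = (pvBreaks o m).length - 1 :=
            pvAdjDiffs_length _
          have h2 : 2 ≤ (pvBreaks o m).length := by simp [pvBreaks]
          intro hnil
          rw [hnil] at hlen
          simp at hlen
          omega
        obtain ⟨a, t, hat⟩ := List.exists_cons_of_ne_nil hd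
        rw [hat, show (m : Int) + 1 - (m : Int) = 1 from by ring, pvMaxD_append_cons, ← hat, hmax]
        rw [max_def]
        split_ifs with h6 <;> omega

-- zip(ordered[:-1], ordered[1:]) as a map over gap indices
theorem pvZip_eq_map_range (o : List Int) :
    List.zip o.dropLast o.tail
      = (List.range (o.length - 1)).map (fun i => (o.getD i 0, o.getD (i+1) 0)) := by
  apply List.ext_getElem
  · simp [List.length_zip, List.length_tail]
  · intro i h1 h2
    have hi : i < o.length - 1 := by
      simpa [List.length_zip, List.length_tail] using h1
    have hi0 : i < o.length := by omega
    have hi1 : i + 1 < o.length := by omega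
    simp [List.getElem_zip, List.getElem_dropLast, List.getElem_tail,
      List.getElem?_eq_getElem hi0, List.getElem?_eq_getElem hi1]

-- ===== VERDICT (by name: the statement is the Claim_ definition above) =====
theorem max_consecutive_ages_py_spec : Claim_equal_max_consecutive_ages_py := by
  intro ages _
  unfold Spec_max_consecutive_ages_py max_consecutive_ages_py max_consecutive_ages_py_alt
  by_cases hnil : ages = []
  · simp [hnil]
  · simp only [if_neg hnil]
    set o := PySem.List.sorted (PySem.Set.ofList ages) (fun x => x) false with ho
    have hone : o ≠ [] := by
      obtain ⟨a, t, rfl⟩ := List.exists_cons_of_ne_nil hnil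
      have : a ∈ o := by
        rw [ho, PySem.List.mem_sorted, PySem.Set.mem_ofList]
        simp
      exact List.ne_nil_of_mem this
    have hn : 1 ≤ o.length := List.length_pos_iff.mpr hone
    -- A side
    have hA : ((List.zip (PySem.List.slice o none (some (-1))) (PySem.List.slice o (some 1) none)).foldl
        pvStepA (1, 1)).1 = (pvAState o (o.length - 1)).1 := by
      rw [PySem.List.slice_to_neg_one, PySem.List.slice_from_one, pvZip_eq_map_range, List.foldl_map]
      rfl
    -- B side
    have hcollect : pvCollect o = fun acc i =>
        if pvBig o i = true then acc ++ [(fun j : Nat => (j : Int)) i] else acc := by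
      funext acc i
      simp [pvCollect, pvBig]
    have hB : (List.range (o.length - 1)).foldl (pvCollect o) [(-1 : Int)] ++ [(o.length : Int) - 1]
        = pvBreaks o (o.length - 1) := by
      rw [hcollect, PySem.List.foldl_append_if]
      simp [pvBreaks, pvMids]
      exact ⟨by simp [List.map_eq_flatMap], by omega⟩
    obtain ⟨hb1, _, hmax⟩ := pvInv o (o.length - 1)
    have hd : pvAdjDiffs (pvBreaks o (o.length - 1)) ≠ [] := by
      have hlen := pvAdjDiffs_length (pvBreaks o (o.length - 1))
      have : 2 ≤ (pvBreaks o (o.length - 1)).length := by simp [pvBreaks]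
      intro hnil'
      rw [hnil'] at hlen
      simp at hlen
      omega
    obtain ⟨a, t, hat⟩ := List.exists_cons_of_ne_nil hd
    rw [hA, hB, hat, PySem.List.max?_id_cons]
    have : pvMaxD (a :: t) = (pvAState o (o.length - 1)).1 := by rw [← hat, hmax]
    simpa [pvMaxD] using this.symm
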